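-- pv_equiv track=rewrite | github.com/MrBrantCode/unitest_baseline | mut_generate/mist_train_cf/cf_89208/solution.py | delete_last_occurrence
-- ===== SOURCE A (Python) =====
-- def delete_last_occurrence(input_list, value):
--     index = None
--     for i in range(len(input_list)-1, -1, -1):
--         if input_list[i] == value:
--             index = i
--             break
--     if index is None:
--         return input_list
--     new_list = input_list[:]
--     del new_list[index]
--     return new_list
-- ===== SOURCE B (Python) =====
-- def delete_last_occurrence(input_list, value):
--     rev = input_list[::-1]
--     try:
--         rev.remove(value)
--     except ValueError:
--         return input_list
--     return rev[::-1]
-- ===== Notes on version B (the rewrite author's own statement) =====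
-- stated objective: idiomatic
-- what changed: Replaces the manual backward index scan plus slice-copy-and-del with reversing the list, using built-in list.remove to drop the first occurrence in the reversed copy (= last occurrence in the original), and reversing back; the not-found ValueError branch returns the original list unchanged.
import Mathlib
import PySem

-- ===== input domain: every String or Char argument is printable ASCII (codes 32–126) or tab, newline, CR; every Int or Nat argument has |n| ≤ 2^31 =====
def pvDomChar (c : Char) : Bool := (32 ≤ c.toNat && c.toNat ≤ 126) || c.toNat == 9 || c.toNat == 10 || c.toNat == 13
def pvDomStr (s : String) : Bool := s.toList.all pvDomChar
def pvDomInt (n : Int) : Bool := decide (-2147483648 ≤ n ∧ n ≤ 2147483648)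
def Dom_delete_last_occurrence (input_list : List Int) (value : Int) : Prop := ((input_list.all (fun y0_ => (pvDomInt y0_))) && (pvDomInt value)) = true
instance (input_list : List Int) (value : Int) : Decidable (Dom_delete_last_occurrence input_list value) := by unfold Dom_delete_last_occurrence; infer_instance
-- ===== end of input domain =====

-- B replaces A's manual backward index scan + copy-and-del with reverse / remove-first / reverse (idiomatic; return value only — neither version mutates its argument observably).


-- ===== PORT A =====
-- the 'for i in range(...): if input_list[i] == value: index = i; break' loop;
-- every i drawn from the range is a valid index, so pyGetD with a dummy default is exact here
def pvFindLoopA (input_list : List Int) (value : Int) : List Int → Option Int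
  | [] => none
  | i :: rest =>
      if PySem.List.pyGetD input_list i 0 = value then some i
      else pvFindLoopA input_list value rest

def delete_last_occurrence (input_list : List Int) (value : Int) : List Int :=
  match pvFindLoopA input_list value
      (PySem.List.pyRange (PySem.List.len input_list - 1) (-1) (-1)) with
  | none => input_list
  | some index =>
      -- new_list = input_list[:]; del new_list[index]  (index is in range here, so eraseIdx is exact)
      input_list.eraseIdx index.toNat

-- ===== PORT B =====
def delete_last_occurrence_alt (input_list : List Int) (value : Int) : List Int :=
  let rev := input_list.reverse            -- input_list[::-1]
  match PySem.List.remove? rev value with  -- rev.remove(value); none = ValueError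
  | none => input_list
  | some r => r.reverse                    -- rev[::-1]

-- ===== PRECONDITION & SPEC =====
def Spec_delete_last_occurrence (input_list : List Int) (value : Int) (out : List Int) : Prop := out = delete_last_occurrence_alt input_list value
instance (input_list : List Int) (value : Int) (out : List Int) : Decidable (Spec_delete_last_occurrence input_list value out) := by unfold Spec_delete_last_occurrence; infer_instance

-- ===== CLAIM (what is proved, stated in full; the proofs are below) =====
def Claim_equal_delete_last_occurrence : Prop := ∀ (input_list : List Int) (value : Int), Dom_delete_last_occurrence input_list value → Spec_delete_last_occurrence input_list value (delete_last_occurrence input_list value)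

-- ===== LEMMAS AND PROOFS =====

theorem mem_of_pvFindLoopA_some {l : List Int} {v i : Int} :
    ∀ {is : List Int}, pvFindLoopA l v is = some i → i ∈ is := by
  intro is
  induction is with
  | nil => simp [pvFindLoopA]
  | cons j rest ih =>
      simp only [pvFindLoopA]
      split
      · intro h; simp_all
      · intro h; exact List.mem_cons_of_mem _ (ih h)

theorem pvFindLoopA_append {l : List Int} {x v : Int} :
    ∀ {is : List Int}, (∀ i ∈ is, 0 ≤ i ∧ i < (l.length : Int)) →
      pvFindLoopA (l ++ [x]) v is = pvFindLoopA l v is := by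
  intro is
  induction is with
  | nil => intro _; rfl
  | cons j rest ih =>
      intro h
      obtain ⟨hj0, hjlt⟩ := h j (List.mem_cons_self)
      have hget : PySem.List.pyGetD (l ++ [x]) j 0 = PySem.List.pyGetD l j 0 := by
        rw [PySem.List.pyGetD_eq_getElem (l ++ [x]) 0 hj0 (by simp; omega),
            PySem.List.pyGetD_eq_getElem l 0 hj0 (by simpa using hjlt)]
        exact List.getElem_append_left (by omega)
      simp only [pvFindLoopA, hget]
      split
      · rfl
      · exact ih (fun i hi => h i (List.mem_cons_of_mem _ hi))

theorem range_mem_bound (l : List Int) :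
    ∀ i ∈ PySem.List.pyRange ((l.length : Int) - 1) (-1) (-1), 0 ≤ i ∧ i < (l.length : Int) := by
  intro i hi
  rw [PySem.List.mem_pyRange_neg_one] at hi
  omega

theorem pvFindLoopA_none_iff (l : List Int) (v : Int) :
    pvFindLoopA l v (PySem.List.pyRange ((l.length : Int) - 1) (-1) (-1)) = none ↔ v ∉ l := by
  induction l using List.reverseRecOn with
  | nil => simp [pvFindLoopA, PySem.List.pyRange_neg_one_eq_nil]
  | append_singleton l x ih =>
      have hn : ((l ++ [x]).length : Int) - 1 = (l.length : Int) := by simp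
      rw [hn, PySem.List.pyRange_neg_one_cons (by omega)]
      have hget : PySem.List.pyGetD (l ++ [x]) (l.length : Int) 0 = x := by
        rw [PySem.List.pyGetD_eq_getElem (l ++ [x]) 0 (by omega) (by simp)]
        simp
      simp only [pvFindLoopA, hget]
      split
      · rename_i hx
        simp [hx]
      · rename_i hx
        rw [pvFindLoopA_append (range_mem_bound l), ih]
        simp [Ne.symm hx]

theorem eraseIdx_append_last (l : List Int) (v : Int) : (l ++ [v]).eraseIdx l.length = l := by
  induction l with
  | nil => rfl
  | cons a t ih => simpa [List.eraseIdx] using ih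

theorem eraseIdx_append_left (x : Int) : ∀ (l : List Int) (i : Nat), i < l.length → (l ++ [x]).eraseIdx i = l.eraseIdx i ++ [x] := by
  intro l
  induction l with
  | nil => intro i h; simp at h
  | cons a t ih =>
      intro i h
      cases i with
      | zero => simp [List.eraseIdx]
      | succ n => simpa [List.eraseIdx] using ih n (by simpa using h)

theorem A_eq_B (l : List Int) (v : Int) :
    delete_last_occurrence l v = delete_last_occurrence_alt l v := by
  induction l using List.reverseRecOn with
  | nil => rfl
  | append_singleton l x ih =>
      unfold delete_last_occurrence delete_last_occurrence_alt
      simp only [PySem.List.len_eq]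
      have hn : ((l ++ [x]).length : Int) - 1 = (l.length : Int) := by simp
      rw [hn, PySem.List.pyRange_neg_one_cons (by omega)]
      have hget : PySem.List.pyGetD (l ++ [x]) (l.length : Int) 0 = x := by
        rw [PySem.List.pyGetD_eq_getElem (l ++ [x]) 0 (by omega) (by simp)]
        simp
      simp only [pvFindLoopA, hget]
      by_cases hx : x = v
      · -- last element matches: A deletes at index len l, B removes head of reverse
        subst hx
        rw [if_pos rfl, List.reverse_append]
        simp only [List.reverse_singleton, List.singleton_append, PySem.List.remove?_cons_self]
        simpa using eraseIdx_append_last l x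
      · rw [if_neg hx, pvFindLoopA_append (range_mem_bound l), List.reverse_append]
        simp only [List.reverse_singleton, List.singleton_append]
        rw [PySem.List.remove?_cons_of_ne l.reverse hx]
        unfold delete_last_occurrence delete_last_occurrence_alt at ih
        simp only [PySem.List.len_eq] at ih
        cases hA : pvFindLoopA l v (PySem.List.pyRange ((l.length : Int) - 1) (-1) (-1)) with
        | none =>
            have hv : v ∉ l := (pvFindLoopA_none_iff l v).mp hA
            have : PySem.List.remove? l.reverse v = none := by
              rw [PySem.List.remove?_eq_none_iff]; simpa using hv
            simp [this]
        | some i =>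
            have hi := range_mem_bound l i (mem_of_pvFindLoopA_some hA)
            have hv : v ∈ l := by
              by_contra hv
              exact absurd hA (by simp [(pvFindLoopA_none_iff l v).mpr hv])
            have hrv : v ∈ l.reverse := by simpa using hv
            rw [hA] at ih
            rw [PySem.List.remove?_eq_some_erase l.reverse v hrv] at ih ⊢
            simp only [Option.map_some]
            rw [eraseIdx_append_left x l i.toNat (by omega)]
            simp only at ih
            simp [ih]

-- ===== VERDICT (by name: the statement is the Claim_ definition above) =====
theorem delete_last_occurrence_spec : Claim_equal_delete_last_occurrence := by
  intro l v _
  unfold Spec_delete_last_occurrence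
  exact A_eq_B l v
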